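-- pv_equiv track=rewrite | github.com/erichowens/auto-expense-analyzer | friday_panic_button.py | _has_conference_pattern
-- ===== SOURCE A (Python) =====
-- from typing import Dict, List, Optional, Tuple
--
-- def _has_conference_pattern(transactions: List[Dict]) -> bool:
--     """Detect if this looks like a conference trip."""
--     conference_indicators = [
--         'convention', 'conference', 'summit', 'symposium', 'expo',
--         'registration', 'attendee', 'badge'
--     ]
--
--     for t in transactions:
--         desc = t.get('description', '').lower()
--         if any(indicator in desc for indicator in conference_indicators):
--             return True
--
--     # Multiple days at same hotel + meals = likely conference
--     hotel_count = sum(1 for t in transactions if t.get('category') == 'HOTEL')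
--     meals_count = sum(1 for t in transactions if t.get('category') == 'MEALS')
--
--     return hotel_count >= 2 and meals_count >= 4
-- ===== SOURCE B (Python) =====
-- from typing import Dict, List, Optional, Tuple
--
-- CONFERENCE_INDICATORS = [
--     'convention', 'conference', 'summit', 'symposium', 'expo',
--     'registration', 'attendee', 'badge'
-- ]
--
-- def _has_conference_pattern(transactions: List[Dict]) -> bool:
--     """Single pass: track keyword hit and hotel/meal counts together."""
--     found_keyword = False
--     hotel_count = 0
--     meals_count = 0
--     for t in transactions:
--         desc = t.get('description', '').lower()
--         for indicator in CONFERENCE_INDICATORS: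
--             if indicator in desc:
--                 found_keyword = True
--         cat = t.get('category')
--         if cat == 'HOTEL':
--             hotel_count += 1
--         elif cat == 'MEALS':
--             meals_count += 1
--     return found_keyword or (hotel_count >= 2 and meals_count >= 4)
-- ===== Notes on version B (the rewrite author's own statement) =====
-- stated objective: alternative
-- what changed: Replaced A's three separate scans (early-return keyword loop plus two sum-comprehension passes) by one fold over the transactions maintaining a keyword flag and both category counters.
import Mathlib
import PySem

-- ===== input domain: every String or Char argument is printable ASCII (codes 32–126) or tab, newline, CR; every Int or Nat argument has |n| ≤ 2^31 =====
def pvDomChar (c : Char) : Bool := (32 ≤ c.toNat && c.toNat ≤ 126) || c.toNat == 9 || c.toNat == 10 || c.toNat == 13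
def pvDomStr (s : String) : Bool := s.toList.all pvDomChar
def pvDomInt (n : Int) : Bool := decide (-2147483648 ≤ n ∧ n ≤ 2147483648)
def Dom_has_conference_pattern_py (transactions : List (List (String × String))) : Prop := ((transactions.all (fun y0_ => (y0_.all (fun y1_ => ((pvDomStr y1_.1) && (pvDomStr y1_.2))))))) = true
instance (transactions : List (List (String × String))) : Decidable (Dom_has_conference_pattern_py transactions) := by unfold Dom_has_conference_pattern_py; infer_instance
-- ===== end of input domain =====

-- B replaces A's three separate scans by a single fold carrying a keyword flag and both category counters (alternative decomposition, same cost).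


-- ===== PORT A =====
def confIndicators : List String :=
  ["convention", "conference", "summit", "symposium", "expo",
   "registration", "attendee", "badge"]

-- A: early-return keyword loop, then two separate 1-sum passes over category
def has_conference_pattern_py (transactions : List (List (String × String))) : Bool :=
  if transactions.any (fun t =>
      confIndicators.any (fun ind =>
        PySem.Str.isIn ind (PySem.Str.lower (PySem.Dict.getD ⟨t⟩ "description" "")))) then
    true
  else
    let hotel_count : Int :=
      ((transactions.filter (fun t => PySem.Dict.get? ⟨t⟩ "category" == some "HOTEL")).map
        (fun _ => (1 : Int))).sum
    let meals_count : Int :=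
      ((transactions.filter (fun t => PySem.Dict.get? ⟨t⟩ "category" == some "MEALS")).map
        (fun _ => (1 : Int))).sum
    decide (hotel_count ≥ 2) && decide (meals_count ≥ 4)

-- ===== PORT B =====
-- B: one fold maintaining (found_keyword, hotel_count, meals_count)
def has_conference_pattern_py_alt (transactions : List (List (String × String))) : Bool :=
  let st := transactions.foldl
    (fun (acc : Bool × Int × Int) t =>
      let desc := PySem.Str.lower (PySem.Dict.getD ⟨t⟩ "description" "")
      let found := confIndicators.foldl
        (fun f ind => if PySem.Str.isIn ind desc then true else f) acc.1
      let cat := PySem.Dict.get? ⟨t⟩ "category"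
      if cat == some "HOTEL" then (found, acc.2.1 + 1, acc.2.2)
      else if cat == some "MEALS" then (found, acc.2.1, acc.2.2 + 1)
      else (found, acc.2))
    (false, 0, 0)
  st.1 || (decide (st.2.1 ≥ 2) && decide (st.2.2 ≥ 4))

-- ===== PRECONDITION & SPEC =====
def Spec_has_conference_pattern_py (transactions : List (List (String × String))) (out : Bool) : Prop := out = has_conference_pattern_py_alt transactions
instance (transactions : List (List (String × String))) (out : Bool) : Decidable (Spec_has_conference_pattern_py transactions out) := by unfold Spec_has_conference_pattern_py; infer_instance

-- ===== CLAIM (what is proved, stated in full; the proofs are below) =====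
def Claim_equal_has_conference_pattern_py : Prop := ∀ (transactions : List (List (String × String))), Dom_has_conference_pattern_py transactions → Spec_has_conference_pattern_py transactions (has_conference_pattern_py transactions)

-- ===== LEMMAS AND PROOFS =====

-- the per-transaction keyword test used by A
def kwHit (t : List (String × String)) : Bool :=
  confIndicators.any (fun ind =>
    PySem.Str.isIn ind (PySem.Str.lower (PySem.Dict.getD ⟨t⟩ "description" "")))

-- 'for ind in L: if g(ind): flag = True' is flag ∨ any
lemma foldl_or_any {α : Type} (l : List α) (g : α → Bool) (b : Bool) :
    l.foldl (fun f ind => if g ind then true else f) b = (b || l.any g) := by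
  induction l generalizing b with
  | nil => simp
  | cons x xs ih =>
      simp only [List.foldl_cons, List.any_cons, ih]
      by_cases h : g x = true <;> simp [h]

lemma sum_ones (l : List (List (String × String))) (p : List (String × String) → Bool) :
    ((l.filter p).map (fun _ => (1 : Int))).sum = (l.countP p : Int) := by
  induction l with
  | nil => simp
  | cons x xs ih =>
      by_cases h : p x = true <;>
        simp [h, List.countP_eq_length_filter] <;> ring

lemma fold_inv (l : List (List (String × String))) (b : Bool) (h m : Int) :
    l.foldl
      (fun (acc : Bool × Int × Int) t =>
        let desc := PySem.Str.lower (PySem.Dict.getD ⟨t⟩ "description" "")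
        let found := confIndicators.foldl
          (fun f ind => if PySem.Str.isIn ind desc then true else f) acc.1
        let cat := PySem.Dict.get? ⟨t⟩ "category"
        if cat == some "HOTEL" then (found, acc.2.1 + 1, acc.2.2)
        else if cat == some "MEALS" then (found, acc.2.1, acc.2.2 + 1)
        else (found, acc.2)) (b, h, m)
    = (b || l.any kwHit,
       h + (l.countP (fun t => PySem.Dict.get? ⟨t⟩ "category" == some "HOTEL") : Int),
       m + (l.countP (fun t => PySem.Dict.get? ⟨t⟩ "category" == some "MEALS") : Int)) := by
  induction l generalizing b h m with
  | nil => simp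
  | cons x xs ih =>
      have hkw : confIndicators.foldl
          (fun f ind => if PySem.Str.isIn ind
              (PySem.Str.lower (PySem.Dict.getD ⟨x⟩ "description" "")) then true else f) b
          = (b || kwHit x) := by
        rw [foldl_or_any]; rfl
      simp only [List.foldl_cons, List.any_cons, List.countP_cons]
      by_cases h1 : (PySem.Dict.get? ⟨x⟩ "category" == some "HOTEL") = true
      · have h2 : (PySem.Dict.get? ⟨x⟩ "category" == some "MEALS") = false := by
          simp only [beq_iff_eq] at h1 ⊢; simp [h1]
        simp only [h1, h2, if_true, if_false, Bool.false_eq_true, hkw, ih, Prod.mk.injEq]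
        refine ⟨by simp [Bool.or_assoc], ?_, ?_⟩ <;> push_cast [h1, h2] <;> ring
      · by_cases h2 : (PySem.Dict.get? ⟨x⟩ "category" == some "MEALS") = true
        · simp only [h1, h2, if_true, if_false, Bool.false_eq_true, hkw, ih, Prod.mk.injEq]
          refine ⟨by simp [Bool.or_assoc], ?_, ?_⟩ <;>
            push_cast [h1, h2] <;> ring <;> try ring
        · simp only [h1, h2, if_false, Bool.false_eq_true, hkw, ih, Prod.mk.injEq]
          refine ⟨by simp [Bool.or_assoc], ?_, ?_⟩ <;>
            push_cast [h1, h2] <;> ring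

-- ===== VERDICT (by name: the statement is the Claim_ definition above) =====
theorem has_conference_pattern_py_spec : Claim_equal_has_conference_pattern_py := by
  intro ts _
  unfold Spec_has_conference_pattern_py has_conference_pattern_py has_conference_pattern_py_alt
  rw [fold_inv]
  have hfun : (fun t => confIndicators.any (fun ind =>
      PySem.Str.isIn ind (PySem.Str.lower (PySem.Dict.getD ⟨t⟩ "description" "")))) = kwHit := by
    funext t; rfl
  rw [hfun]
  simp only [sum_ones, Bool.false_or, zero_add]
  cases hk : ts.any kwHit <;> simp
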